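-- pv_equiv track=rewrite | github.com/jack2015/TSmedia | usr/lib/enigma2/python/Plugins/Extensions/TSmedia/addons/programs/vlctester/m3uparser.py | GetM3uAttribs
-- ===== SOURCE A (Python) =====
-- def GetM3uAttribs(txt, firstKeyAsLength=False):
--     attribs = {}
--     type = 0 # 0 - key, 1 - start val, 2 - end val
--     key = ''
--     val = ''
--     if firstKeyAsLength:
--         txt = txt.strip()
--     for idx in range(len(txt)):
--         if type == 0:
--             if txt[idx] == ' ' and attribs == {} and firstKeyAsLength:
--                 attribs['length'] = key.strip()
--                 key = ''
--             elif txt[idx] == '=':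
--                 type = 1
--             else:
--                 key += txt[idx]
--         elif type == 1:
--             if txt[idx] == ' ':
--                 continue
--             elif txt[idx] == '"':
--                 type = 2
--             else:
--
--                 break
--         elif type == 2:
--             if txt[idx] != '"':
--                 val += txt[idx]
--             else:
--                 attribs[key.strip()] = val
--                 key = ''
--                 val = ''
--                 type = 0
--     return attribs
-- ===== SOURCE B (Python) =====
-- def GetM3uAttribs(txt, firstKeyAsLength=False):
--     # Cursor/slice parser: jump with find() between '=' and quotes instead of a per-char state machine.
--     attribs = {}
--     if firstKeyAsLength:
--         txt = txt.strip()
--         sp = txt.find(' ')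
--         eq = txt.find('=')
--         if sp != -1 and (eq == -1 or sp < eq):
--             attribs['length'] = txt[:sp].strip()
--             txt = txt[sp + 1:]
--     while True:
--         eq = txt.find('=')
--         if eq == -1:
--             return attribs
--         key = txt[:eq].strip()
--         rest = txt[eq + 1:]
--         while rest.startswith(' '):
--             rest = rest[1:]
--         if not rest.startswith('"'):
--             return attribs
--         body = rest[1:]
--         close = body.find('"')
--         if close == -1:
--             return attribs
--         attribs[key] = body[:close]
--         txt = body[close + 1:]
-- ===== Notes on version B (the rewrite author's own statement) =====
-- stated objective: faster
-- what changed: Replaced A's per-character three-state machine (key/start-val/end-val with char-by-char accumulator strings) by a cursor parser that jumps directly to the next equals sign and the opening/closing quotes with str.find and slices the key and value out of the text in one step.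
import Mathlib
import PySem

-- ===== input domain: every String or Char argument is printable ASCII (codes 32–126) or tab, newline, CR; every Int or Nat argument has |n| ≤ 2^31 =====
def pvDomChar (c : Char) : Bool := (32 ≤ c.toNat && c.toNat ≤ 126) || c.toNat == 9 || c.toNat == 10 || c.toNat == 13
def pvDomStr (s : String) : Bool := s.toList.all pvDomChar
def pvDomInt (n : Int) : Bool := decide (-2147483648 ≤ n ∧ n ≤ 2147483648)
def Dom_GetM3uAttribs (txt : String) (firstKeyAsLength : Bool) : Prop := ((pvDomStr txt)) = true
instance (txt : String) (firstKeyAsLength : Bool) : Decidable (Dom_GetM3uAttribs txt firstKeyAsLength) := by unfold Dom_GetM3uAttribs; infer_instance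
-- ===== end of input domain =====

-- B replaces A's per-character three-state machine by a cursor parser that jumps with find()
-- between '=' and quote positions (objective: alternative decomposition; same order of results).

-- ===== PORT A =====
-- the for-loop of A with its state (attribs, type, key, val); 'break' returns the dict;
-- the final 'else' branch corresponds to A's 'elif type == 2' (type only ever takes 0,1,2)
def pvALoop (fkal : Bool) : List Char → PySem.Dict String String → Nat → List Char → List Char → PySem.Dict String String
  | [], d, _, _, _ => d
  | c :: rest, d, ty, key, val =>
    if ty = 0 then
      if c = ' ' ∧ d.items = [] ∧ fkal = true then
        pvALoop fkal rest (d.insert "length" (String.mk (PySem.Chars.strip key))) 0 [] val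
      else if c = '=' then
        pvALoop fkal rest d 1 key val
      else
        pvALoop fkal rest d 0 (key ++ [c]) val
    else if ty = 1 then
      if c = ' ' then
        pvALoop fkal rest d 1 key val
      else if c = '"' then
        pvALoop fkal rest d 2 key val
      else
        d
    else
      if c ≠ '"' then
        pvALoop fkal rest d 2 key (val ++ [c])
      else
        pvALoop fkal rest (d.insert (String.mk (PySem.Chars.strip key)) (String.mk val)) 0 [] []

def GetM3uAttribs (txt : String) (firstKeyAsLength : Bool) : List (String × String) :=
  let txt := if firstKeyAsLength then PySem.Str.strip txt else txt
  (pvALoop firstKeyAsLength txt.toList PySem.Dict.empty 0 [] []).items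

-- ===== PORT B =====
-- port of Source B's inner "while rest.startswith(' '): rest = rest[1:]"
def pvSkipSpaces : List Char → List Char
  | [] => []
  | c :: r => if c = ' ' then pvSkipSpaces r else c :: r

-- Source B's "while True" loop.  The fuel parameter (text length + 1) only makes the loop total:
-- every iteration strictly shortens the remaining text, so fuel never runs out.  Slices
-- txt[:eq], txt[eq+1:], rest[1:], body[:close], body[close+1:] have nonnegative bounds here
-- (find returned ≥ 0), so List.take/List.drop are exact.
def pvBLoop : Nat → List Char → PySem.Dict String String → PySem.Dict String String
  | 0, _, d => d
  | fuel + 1, cs, d =>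
    let eq := PySem.Chars.find cs ['=']
    if eq = -1 then d
    else
      let key := String.mk (PySem.Chars.strip (cs.take eq.toNat))
      let rest := pvSkipSpaces (cs.drop (eq.toNat + 1))
      if PySem.Chars.startswith rest ['"'] = false then d
      else
        let body := rest.drop 1
        let close := PySem.Chars.find body ['"']
        if close = -1 then d
        else pvBLoop fuel (body.drop (close.toNat + 1)) (d.insert key (String.mk (body.take close.toNat)))

def GetM3uAttribs_alt (txt : String) (firstKeyAsLength : Bool) : List (String × String) :=
  if firstKeyAsLength then
    let cs := (PySem.Str.strip txt).toList
    let sp := PySem.Chars.find cs [' ']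
    let eq := PySem.Chars.find cs ['=']
    if sp ≠ -1 ∧ (eq = -1 ∨ sp < eq) then
      (pvBLoop ((cs.drop (sp.toNat + 1)).length + 1) (cs.drop (sp.toNat + 1))
        (PySem.Dict.empty.insert "length" (String.mk (PySem.Chars.strip (cs.take sp.toNat))))).items
    else (pvBLoop (cs.length + 1) cs PySem.Dict.empty).items
  else (pvBLoop (txt.toList.length + 1) txt.toList PySem.Dict.empty).items

-- ===== PRECONDITION & SPEC =====
def Spec_GetM3uAttribs (txt : String) (firstKeyAsLength : Bool) (out : List (String × String)) : Prop := out = GetM3uAttribs_alt txt firstKeyAsLength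
instance (txt : String) (firstKeyAsLength : Bool) (out : List (String × String)) : Decidable (Spec_GetM3uAttribs txt firstKeyAsLength out) := by unfold Spec_GetM3uAttribs; infer_instance

-- ===== CLAIM (what is proved, stated in full; the proofs are below) =====
def Claim_equal_GetM3uAttribs : Prop := ∀ (txt : String) (firstKeyAsLength : Bool), Dom_GetM3uAttribs txt firstKeyAsLength → Spec_GetM3uAttribs txt firstKeyAsLength (GetM3uAttribs txt firstKeyAsLength)

-- ===== LEMMAS AND PROOFS =====

theorem pvSkipSpaces_length_le (cs : List Char) : (pvSkipSpaces cs).length ≤ cs.length := by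
  induction cs with
  | nil => simp [pvSkipSpaces]
  | cons c r ih => by_cases h : c = ' ' <;> simp [pvSkipSpaces, h] <;> omega

-- find of a single character, computed from non-membership / from an explicit first-occurrence split
theorem pv_find_single_neg (cs : List Char) (c : Char) (h : c ∉ cs) :
    PySem.Chars.find cs [c] = -1 := by
  rw [PySem.Chars.find_eq_neg_one_iff, List.singleton_infix_iff]
  exact h

theorem pv_find_single_split (p r : List Char) (c : Char) (hp : c ∉ p) :
    PySem.Chars.find (p ++ c :: r) [c] = (p.length : Int) := by
  have hinf : [c] <:+: p ++ c :: r := (List.singleton_infix_iff c _).2 (by simp)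
  have h0 : 0 ≤ PySem.Chars.find (p ++ c :: r) [c] := (PySem.Chars.find_nonneg_iff _ _).2 hinf
  obtain ⟨hpre, hmin⟩ := PySem.Chars.find_spec h0
  have hat : [c] <+: (p ++ c :: r).drop p.length := by
    rw [List.drop_left' rfl]
    exact ⟨r, rfl⟩
  have hle : (PySem.Chars.find (p ++ c :: r) [c]).toNat ≤ p.length := by
    by_contra hlt
    exact hmin p.length (by omega) hat
  have hge : ¬ (PySem.Chars.find (p ++ c :: r) [c]).toNat < p.length := by
    intro hlt
    obtain ⟨t, ht⟩ := hpre
    have h1 : (p ++ c :: r)[(PySem.Chars.find (p ++ c :: r) [c]).toNat]? = some c := by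
      have : ((p ++ c :: r).drop (PySem.Chars.find (p ++ c :: r) [c]).toNat)[0]? = some c := by
        rw [← ht]; rfl
      rwa [List.getElem?_drop, Nat.add_zero] at this
    rw [List.getElem?_append, if_pos (by simpa using hlt)] at h1
    exact hp (List.mem_of_getElem? h1)
  omega

theorem pv_insert_items_ne_nil (d : PySem.Dict String String) (k v : String) :
    (d.insert k v).items ≠ [] := by
  intro h
  have h2 : d.insert k v = (PySem.Dict.empty : PySem.Dict String String) := PySem.Dict.ext h
  have h3 := PySem.Dict.get?_insert_self d k v
  rw [h2, PySem.Dict.get?_empty] at h3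
  cases h3

theorem pv_startswith_quote (rest : List Char) :
    PySem.Chars.startswith rest ['"'] = false ↔ rest.head? ≠ some '"' := by
  rcases rest with _ | ⟨x, xs⟩
  · constructor
    · intro _; simp
    · intro _; decide
  · constructor
    · intro hf hh
      have hx : x = '"' := by simpa using hh
      subst hx
      have ht : PySem.Chars.startswith ('"' :: xs) ['"'] = true :=
        (PySem.Chars.startswith_iff _ _).2 ⟨xs, rfl⟩
      rw [ht] at hf; cases hf
    · intro hh
      by_contra hf
      have ht : PySem.Chars.startswith (x :: xs) ['"'] = true := by
        cases hb : PySem.Chars.startswith (x :: xs) ['"'] with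
        | false => exact absurd hb hf
        | true => rfl
      obtain ⟨t, htp⟩ := (PySem.Chars.startswith_iff _ _).1 ht
      simp only [List.cons_append, List.nil_append, List.cons.injEq] at htp
      exact hh (by simp [htp.1.symm])

-- A's type-1 phase: skip spaces, then require an opening quote
theorem pvALoop_ty1 (fkal : Bool) (cs : List Char) (d : PySem.Dict String String) (k v : List Char) :
    pvALoop fkal cs d 1 k v =
      if (pvSkipSpaces cs).head? = some '"' then
        pvALoop fkal ((pvSkipSpaces cs).drop 1) d 2 k v
      else d := by
  induction cs with
  | nil => simp [pvALoop, pvSkipSpaces]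
  | cons c r ih =>
    by_cases h1 : c = ' '
    · subst h1
      rw [show pvALoop fkal (' ' :: r) d 1 k v = pvALoop fkal r d 1 k v from by simp [pvALoop]]
      rw [ih]
      simp [pvSkipSpaces]
    · by_cases h2 : c = '"'
      · subst h2
        simp [pvALoop, pvSkipSpaces]
      · simp [pvALoop, pvSkipSpaces, h1, h2]

-- A's type-2 phase, closing quote present
theorem pvALoop_ty2_split (fkal : Bool) :
    ∀ (body tail : List Char) (d : PySem.Dict String String) (k v : List Char), '"' ∉ body →
    pvALoop fkal (body ++ '"' :: tail) d 2 k v =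
      pvALoop fkal tail (d.insert (String.mk (PySem.Chars.strip k)) (String.mk (v ++ body))) 0 [] [] := by
  intro body
  induction body with
  | nil => intro tail d k v _; simp [pvALoop]
  | cons c b ih =>
    intro tail d k v hb
    have hc : c ≠ '"' := by simp at hb; exact Ne.symm hb.1
    have hb' : '"' ∉ b := by simp at hb; exact hb.2
    rw [List.cons_append]
    rw [show pvALoop fkal (c :: (b ++ '"' :: tail)) d 2 k v
        = pvALoop fkal (b ++ '"' :: tail) d 2 k (v ++ [c]) from by simp [pvALoop, hc]]
    rw [ih tail d k (v ++ [c]) hb']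
    simp

-- A's type-2 phase, no closing quote
theorem pvALoop_ty2_none (fkal : Bool) :
    ∀ (cs : List Char) (d : PySem.Dict String String) (k v : List Char), '"' ∉ cs →
    pvALoop fkal cs d 2 k v = d := by
  intro cs
  induction cs with
  | nil => intro d k v _; simp [pvALoop]
  | cons c r ih =>
    intro d k v hb
    have hc : c ≠ '"' := by simp at hb; exact Ne.symm hb.1
    have hb' : '"' ∉ r := by simp at hb; exact hb.2
    rw [show pvALoop fkal (c :: r) d 2 k v = pvALoop fkal r d 2 k (v ++ [c]) from by simp [pvALoop, hc]]
    exact ih d k (v ++ [c]) hb'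

-- first occurrence split: cs = p ++ c :: r with c ∉ p
theorem pv_first_split : ∀ (cs : List Char) (c : Char), c ∈ cs → ∃ p r, cs = p ++ c :: r ∧ c ∉ p := by
  intro cs c h
  induction cs with
  | nil => cases h
  | cons x xs ih =>
    by_cases hx : x = c
    · exact ⟨[], xs, by simp [hx], by simp⟩
    · have hm : c ∈ xs := by
        rcases List.mem_cons.1 h with h1 | h1
        · exact absurd h1.symm hx
        · exact h1
      obtain ⟨p, r, he, hn⟩ := ih hm
      refine ⟨x :: p, r, by rw [List.cons_append, he], ?_⟩
      simp only [List.mem_cons, not_or]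
      exact ⟨fun hcx => hx hcx.symm, hn⟩

-- takeWhile over an explicit split
theorem pv_takeWhile_eq (p : Char → Bool) :
    ∀ (q r : List Char) (c : Char), (∀ x ∈ q, p x = true) → p c = false →
    (q ++ c :: r).takeWhile p = q := by
  intro q
  induction q with
  | nil => intro r c _ hc; simp [List.takeWhile_cons, hc]
  | cons x xs ih =>
    intro r c hq hc
    rw [List.cons_append, List.takeWhile_cons, if_pos (hq x (by simp))]
    rw [ih r c (fun y hy => hq y (by simp [hy])) hc]

-- head of dropWhile fails the predicate
theorem pv_dropWhile_head (p : Char → Bool) :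
    ∀ (l : List Char) (x : Char) (xs : List Char), l.dropWhile p = x :: xs → p x = false := by
  intro l
  induction l with
  | nil => intro x xs h; cases h
  | cons c r ih =>
    intro x xs h
    rw [List.dropWhile_cons] at h
    by_cases hc : p c = true
    · rw [if_pos hc] at h; exact ih x xs h
    · rw [if_neg hc] at h
      cases h
      simpa using hc

-- dropWhile over an explicit split / append of satisfied elements
theorem pv_dropWhile_eq (p : Char → Bool) :
    ∀ (q r : List Char) (c : Char), (∀ x ∈ q, p x = true) → p c = false →
    (q ++ c :: r).dropWhile p = c :: r := by
  intro q
  induction q with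
  | nil => intro r c _ hc; simp [List.dropWhile_cons, hc]
  | cons x xs ih =>
    intro r c hq hc
    rw [List.cons_append, List.dropWhile_cons, if_pos (hq x (by simp))]
    exact ih r c (fun y hy => hq y (by simp [hy])) hc

theorem pv_dropWhile_append (p : Char → Bool) :
    ∀ (q l : List Char), (∀ x ∈ q, p x = true) →
    (q ++ l).dropWhile p = l.dropWhile p := by
  intro q
  induction q with
  | nil => intro l _; simp
  | cons x xs ih =>
    intro l hq
    rw [List.cons_append, List.dropWhile_cons, if_pos (hq x (by simp))]
    exact ih l (fun y hy => hq y (by simp [hy]))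

-- pvBLoop ignores the exact fuel value as soon as the fuel exceeds the length of the
-- text from the first '=' on (each iteration works strictly inside that part)
theorem pvBLoop_fuel : ∀ (f : Nat) (cs : List Char) (d : PySem.Dict String String) (g : Nat),
    (cs.dropWhile (· ≠ '=')).length ≤ f → (cs.dropWhile (· ≠ '=')).length ≤ g →
    pvBLoop (f + 1) cs d = pvBLoop (g + 1) cs d := by
  intro f
  induction f with
  | zero =>
    intro cs d g hf hg
    have hnil : cs.dropWhile (· ≠ '=') = [] := List.eq_nil_of_length_eq_zero (by omega)
    have hnm : '=' ∉ cs := by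
      intro hm
      obtain ⟨p, r, he, hn⟩ := pv_first_split cs '=' hm
      rw [he, pv_dropWhile_eq _ p r '=' (fun y hy => by simp; intro h; exact hn (h ▸ hy)) (by decide)] at hnil
      cases hnil
    rw [pvBLoop, pvBLoop, pv_find_single_neg cs '=' hnm]
    simp
  | succ f ihf =>
    intro cs d g hf hg
    by_cases hm : '=' ∈ cs
    · obtain ⟨p, r, he, hn⟩ := pv_first_split cs '=' hm
      subst he
      have hdw : ((p ++ '=' :: r).dropWhile (· ≠ '=')) = '=' :: r :=
        pv_dropWhile_eq _ p r '=' (fun y hy => by simp; intro h; exact hn (h ▸ hy)) (by decide)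
      rw [hdw] at hf hg
      simp only [List.length_cons] at hf hg
      cases g with
      | zero => omega
      | succ g' =>
        have hne : ¬ ((p.length : Int) = -1) := by omega
        have hdr : (p ++ '=' :: r).drop (p.length + 1) = r := by simp [List.drop_append]
        conv_lhs => rw [pvBLoop]
        conv_rhs => rw [pvBLoop]
        simp only [pv_find_single_split p r '=' hn, Int.toNat_natCast, List.take_left, hdr]
        rw [if_neg hne, if_neg hne]
        by_cases h2 : PySem.Chars.startswith (pvSkipSpaces r) ['"'] = false
        · rw [if_pos h2, if_pos h2]
        · rw [if_neg h2, if_neg h2]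
          by_cases h3 : PySem.Chars.find ((pvSkipSpaces r).drop 1) ['"'] = -1
          · rw [if_pos h3, if_pos h3]
          · rw [if_neg h3, if_neg h3]
            have h4 : 1 ≤ (pvSkipSpaces r).length := by
              rcases hw : pvSkipSpaces r with _ | ⟨x, xs⟩
              · rw [hw] at h2; exact absurd (by decide) h2
              · simp
            have h5 : (pvSkipSpaces r).length ≤ r.length := pvSkipSpaces_length_le r
            have hXa : (((pvSkipSpaces r).drop 1).drop
                ((PySem.Chars.find ((pvSkipSpaces r).drop 1) ['"']).toNat + 1)).length
                ≤ (pvSkipSpaces r).length - 1 := by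
              simp only [List.length_drop]
              omega
            have h7 : ((((pvSkipSpaces r).drop 1).drop
                ((PySem.Chars.find ((pvSkipSpaces r).drop 1) ['"']).toNat + 1)).dropWhile (· ≠ '=')).length
                ≤ (((pvSkipSpaces r).drop 1).drop
                ((PySem.Chars.find ((pvSkipSpaces r).drop 1) ['"']).toNat + 1)).length :=
              (List.dropWhile_sublist _).length_le
            have hb : ((((pvSkipSpaces r).drop 1).drop
                ((PySem.Chars.find ((pvSkipSpaces r).drop 1) ['"']).toNat + 1)).dropWhile (· ≠ '=')).length
                ≤ r.length - 1 := le_trans h7 (le_trans hXa (by omega))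
            exact ihf _ _ g' (le_trans hb (by omega)) (le_trans hb (by omega))
    · rw [pvBLoop, pvBLoop, pv_find_single_neg cs '=' hm]
      simp

-- Main simulation: whenever the firstKeyAsLength 'length' branch can no longer fire
-- (dict nonempty, or no space before the first '='), A's state machine equals B's cursor loop
theorem pv_main (fkal : Bool) : ∀ (n : Nat) (cs : List Char), cs.length ≤ n →
    ∀ (d : PySem.Dict String String) (k : List Char),
    (fkal = true → d.items = [] → (' ' ∉ k ∧ ' ' ∉ cs.takeWhile (· ≠ '='))) →
    '=' ∉ k →
    pvALoop fkal cs d 0 k [] = pvBLoop (n + 1) (k ++ cs) d := by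
  intro n
  induction n with
  | zero =>
    intro cs hlen d k H hk
    have hnil : cs = [] := List.eq_nil_of_length_eq_zero (by omega)
    subst hnil
    rw [List.append_nil]
    rw [show pvALoop fkal [] d 0 k [] = d from by simp [pvALoop]]
    rw [pvBLoop, pv_find_single_neg k '=' hk]
    simp
  | succ n ih =>
    intro cs hlen d k H hk
    cases cs with
    | nil =>
      rw [List.append_nil]
      rw [show pvALoop fkal [] d 0 k [] = d from by simp [pvALoop]]
      rw [pvBLoop, pv_find_single_neg k '=' hk]
      simp
    | cons c cs' =>
      by_cases hce : c = '='
      · subst hce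
        rw [show pvALoop fkal ('=' :: cs') d 0 k [] = pvALoop fkal cs' d 1 k [] from by
          simp [pvALoop]]
        rw [pvALoop_ty1]
        rw [pvBLoop, pv_find_single_split k cs' '=' hk]
        have hne : ¬ ((k.length : Int) = -1) := by omega
        rw [if_neg hne, Int.toNat_natCast, List.take_left]
        have hdrop : (k ++ '=' :: cs').drop (k.length + 1) = cs' := by
          simp [List.drop_append]
        rw [hdrop]
        by_cases hq : (pvSkipSpaces cs').head? = some '"'
        · obtain ⟨body, hbody⟩ : ∃ body, pvSkipSpaces cs' = '"' :: body := by
            rcases hr : pvSkipSpaces cs' with _ | ⟨x, xs⟩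
            · rw [hr] at hq; cases hq
            · rw [hr] at hq; exact ⟨xs, by simpa using hq⟩
          rw [if_pos hq]
          have hsw : ¬ (PySem.Chars.startswith (pvSkipSpaces cs') ['"'] = false) := by
            rw [pv_startswith_quote]; simp [hq]
          rw [if_neg hsw, hbody]
          simp only [List.drop_one, List.tail_cons]
          by_cases hqin : '"' ∈ body
          · obtain ⟨b1, tail, hbe, hb1⟩ := pv_first_split body '"' hqin
            rw [hbe]
            rw [pvALoop_ty2_split fkal b1 tail d k [] hb1]
            rw [pv_find_single_split b1 tail '"' hb1]
            rw [if_neg (show ¬ ((b1.length : Int) = -1) by omega)]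
            rw [Int.toNat_natCast, List.take_left]
            have hdrop2 : (b1 ++ '"' :: tail).drop (b1.length + 1) = tail := by
              simp [List.drop_append]
            rw [hdrop2]
            have hlen2 : tail.length ≤ n := by
              have h1 := pvSkipSpaces_length_le cs'
              rw [hbody] at h1
              have h2 : body.length = b1.length + 1 + tail.length := by
                rw [hbe]; simp; omega
              simp at h1 hlen
              omega
            have hith := ih tail hlen2
              (d.insert (String.mk (PySem.Chars.strip k)) (String.mk ([] ++ b1))) []
              (fun _ hd => absurd hd (pv_insert_items_ne_nil _ _ _)) (by simp)
            simp only [List.nil_append] at hith ⊢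
            rw [hith]
          · rw [pvALoop_ty2_none fkal body d k [] hqin]
            rw [pv_find_single_neg body '"' hqin]
            simp
        · rw [if_neg hq]
          rw [if_pos ((pv_startswith_quote _).2 hq)]
      · have hstep : pvALoop fkal (c :: cs') d 0 k [] = pvALoop fkal cs' d 0 (k ++ [c]) [] := by
          by_cases hg : c = ' ' ∧ d.items = [] ∧ fkal = true
          · exfalso
            obtain ⟨hc, hd, hf⟩ := hg
            have h2 := (H hf hd).2
            subst hc
            rw [List.takeWhile_cons, if_pos (by decide)] at h2
            simp at h2
          · simp [pvALoop, hg, hce]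
        rw [hstep]
        have hknew : '=' ∉ k ++ [c] := by
          simp only [List.mem_append, List.mem_singleton, not_or]
          exact ⟨hk, fun h => hce h.symm⟩
        have Hnew : fkal = true → d.items = [] → (' ' ∉ k ++ [c] ∧ ' ' ∉ cs'.takeWhile (· ≠ '=')) := by
          intro hf hd
          obtain ⟨h1, h2⟩ := H hf hd
          rw [List.takeWhile_cons, if_pos (by simpa using hce)] at h2
          simp only [List.mem_cons, not_or] at h2
          constructor
          · simp only [List.mem_append, List.mem_singleton, not_or]
            exact ⟨h1, h2.1⟩
          · exact h2.2
        have hlen2 : cs'.length ≤ n := by simp at hlen; omega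
        rw [ih cs' hlen2 d (k ++ [c]) Hnew hknew]
        rw [show k ++ [c] ++ cs' = (k ++ [c]) ++ cs' from rfl]
        have hmle : (((k ++ [c]) ++ cs').dropWhile (· ≠ '=')).length ≤ n := by
          rw [pv_dropWhile_append _ (k ++ [c]) cs' (by
            intro x hx
            simp only [List.mem_append, List.mem_singleton] at hx
            rcases hx with hx | hx
            · simp; intro h; exact hk (h ▸ hx)
            · subst hx; simpa using hce)]
          exact le_trans (List.dropWhile_sublist _).length_le hlen2
        rw [show (k ++ [c]) ++ cs' = k ++ c :: cs' from by simp] at hmle ⊢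
        exact pvBLoop_fuel n (k ++ c :: cs') d (n + 1) hmle (by omega)

-- scanning a key prefix free of ' ' and '=' (firstKeyAsLength regime, dict still empty)
theorem pv_scan : ∀ (p l k : List Char), (∀ c ∈ p, c ≠ ' ' ∧ c ≠ '=') →
    pvALoop true (p ++ l) PySem.Dict.empty 0 k [] = pvALoop true l PySem.Dict.empty 0 (k ++ p) [] := by
  intro p
  induction p with
  | nil => intro l k _; simp
  | cons c p' ih =>
    intro l k hp
    have hc := hp c (by simp)
    rw [List.cons_append]
    rw [show pvALoop true (c :: (p' ++ l)) PySem.Dict.empty 0 k []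
        = pvALoop true (p' ++ l) PySem.Dict.empty 0 (k ++ [c]) [] from by
      simp [pvALoop, hc.1, hc.2]]
    rw [ih l (k ++ [c]) (fun x hx => hp x (by simp [hx]))]
    simp

-- ===== VERDICT (by name: the statement is the Claim_ definition above) =====
theorem GetM3uAttribs_spec : Claim_equal_GetM3uAttribs := by
  intro txt fkal _
  unfold Spec_GetM3uAttribs GetM3uAttribs GetM3uAttribs_alt
  cases fkal with
  | false =>
    simp only [Bool.false_eq_true, if_false]
    rw [pv_main false txt.toList.length txt.toList le_rfl PySem.Dict.empty []
      (fun h => by cases h) (by simp)]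
    rw [List.nil_append]
  | true =>
    simp only [if_true]
    obtain ⟨q, w, hqw, hqmem, hwh⟩ :
        ∃ q w, (PySem.Str.strip txt).toList = q ++ w ∧ (∀ c ∈ q, c ≠ ' ' ∧ c ≠ '=') ∧
          (w = [] ∨ (∃ rest, w = ' ' :: rest) ∨ (∃ rest, w = '=' :: rest)) := by
      refine ⟨(PySem.Str.strip txt).toList.takeWhile (fun c => decide (c ≠ ' ' ∧ c ≠ '=')),
        (PySem.Str.strip txt).toList.dropWhile (fun c => decide (c ≠ ' ' ∧ c ≠ '=')),
        List.takeWhile_append_dropWhile.symm, ?_, ?_⟩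
      · intro c hm; have := List.mem_takeWhile_imp hm; simpa using this
      · rcases hw : (PySem.Str.strip txt).toList.dropWhile (fun c => decide (c ≠ ' ' ∧ c ≠ '=')) with _ | ⟨x, rest⟩
        · exact Or.inl rfl
        · have hpx := pv_dropWhile_head _ _ x rest hw
          have hx : x = ' ' ∨ x = '=' := by simp at hpx; tauto
          rcases hx with h | h
          · exact Or.inr (Or.inl ⟨rest, by rw [h]⟩)
          · exact Or.inr (Or.inr ⟨rest, by rw [h]⟩)
    rw [hqw]
    have hq1 : ' ' ∉ q := fun hm => (hqmem _ hm).1 rfl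
    have hq2 : '=' ∉ q := fun hm => (hqmem _ hm).2 rfl
    rcases hwh with hwnil | ⟨rest, hwsp⟩ | ⟨rest, hweq⟩
    · subst hwnil
      rw [List.append_nil]
      rw [if_neg (fun hcond => hcond.1 (pv_find_single_neg _ ' ' hq1))]
      rw [pv_main true q.length q le_rfl PySem.Dict.empty []
        (fun _ _ => ⟨by simp, fun hm => hq1 ((List.takeWhile_sublist _).subset hm)⟩) (by simp)]
      rw [List.nil_append]
    · subst hwsp
      rw [pv_find_single_split q rest ' ' hq1]
      rw [if_pos (by
        refine ⟨by omega, ?_⟩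
        by_cases hin : '=' ∈ rest
        · obtain ⟨t, r2, hre, hnt⟩ := pv_first_split rest '=' hin
          right
          rw [hre, show q ++ ' ' :: (t ++ '=' :: r2) = (q ++ ' ' :: t) ++ '=' :: r2 from by simp]
          rw [pv_find_single_split (q ++ ' ' :: t) r2 '=' (by
            simp only [List.mem_append, List.mem_cons, not_or]
            exact ⟨hq2, by decide, hnt⟩)]
          simp only [List.length_append, List.length_cons]
          omega
        · left
          exact pv_find_single_neg _ '=' (by
            simp only [List.mem_append, List.mem_cons, not_or]
            exact ⟨hq2, by decide, hin⟩))]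
      rw [Int.toNat_natCast, List.take_left]
      rw [show (q ++ ' ' :: rest).drop (q.length + 1) = rest from by simp [List.drop_append]]
      rw [pv_scan q (' ' :: rest) [] hqmem, List.nil_append]
      rw [show pvALoop true (' ' :: rest) PySem.Dict.empty 0 q []
          = pvALoop true rest (PySem.Dict.empty.insert "length" (String.mk (PySem.Chars.strip q))) 0 [] [] from by
        simp [pvALoop, show (PySem.Dict.empty : PySem.Dict String String).items = [] from rfl]]
      rw [pv_main true rest.length rest le_rfl _ []
        (fun _ hd => absurd hd (pv_insert_items_ne_nil _ _ _)) (by simp)]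
      rw [List.nil_append]
    · subst hweq
      rw [if_neg (by
        intro hcond
        rw [pv_find_single_split q rest '=' hq2] at hcond
        rcases hcond.2 with h2 | h2
        · exact absurd h2 (by omega)
        · by_cases hin : ' ' ∈ rest
          · obtain ⟨t, r2, hre, hnt⟩ := pv_first_split rest ' ' hin
            rw [hre] at h2
            rw [show q ++ '=' :: (t ++ ' ' :: r2) = (q ++ '=' :: t) ++ ' ' :: r2 from by simp] at h2
            rw [pv_find_single_split (q ++ '=' :: t) r2 ' ' (by
              simp only [List.mem_append, List.mem_cons, not_or]
              exact ⟨hq1, by decide, hnt⟩)] at h2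
            simp only [List.length_append, List.length_cons] at h2
            omega
          · rw [pv_find_single_neg (q ++ '=' :: rest) ' ' (by
              simp only [List.mem_append, List.mem_cons, not_or]
              exact ⟨hq1, by decide, hin⟩)] at hcond
            exact hcond.1 rfl)]
      rw [pv_main true (q ++ '=' :: rest).length _ le_rfl PySem.Dict.empty []
        (fun _ _ => ⟨by simp, by
          rw [pv_takeWhile_eq _ q rest '=' (fun y hy => by simp [(hqmem y hy).2]) (by decide)]
          exact hq1⟩) (by simp)]
      rw [List.nil_append]
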